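-- pv_equiv track=rewrite | github.com/Mr95/UAPV-SEC_SAMI_ZAIR_TP_02 | main.py | readMeassageAlgo
-- ===== SOURCE A (Python) =====
-- NB_OF_BITS = 8
--
-- def isEven(v):
--     return int(v)%2 == 0
--
-- def readMeassageAlgo(pix_list):
--     cptB = cptC = 0
--     asciiBinary = [""]
--     i=0
--     while i<len(pix_list):
--         j=0
--         while j<len(pix_list[i]):
--             if(cptB >= NB_OF_BITS):
--                 if(isEven(pix_list[i][j])):
--                     cptC = cptC + 1
--                     asciiBinary.append("")
--                     cptB = 0
--                 else:
--                     return asciiBinary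
--             else:
--                 if(not(isEven(pix_list[i][j]))):
--                     asciiBinary[cptC] = asciiBinary[cptC] + "1"
--                 else:
--                     asciiBinary[cptC] = asciiBinary[cptC] + "0"
--                 cptB = cptB + 1
--
--             j=j+1
--         i=i+1
--     return asciiBinary
-- ===== SOURCE B (Python) =====
-- def readMeassageAlgo(pix_list):
--     # Stage 1: one parity bit-string for the whole image.
--     bits = "".join("1" if int(v) % 2 else "0" for row in pix_list for v in row)
--     # Stage 2: pure positional decode at stride 9 (8 data bits + 1 separator bit).
--     res = []
--     k = 0
--     while True:
--         res.append(bits[k:k + 8])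
--         if bits[k + 8:k + 9] != "0":   # odd separator or end of stream: message done
--             return res
--         k += 9
-- ===== Notes on version B (the rewrite author's own statement) =====
-- stated objective: alternative
-- what changed: Replaces A's stateful per-pixel machine (counters cptB/cptC, indexed mutation of the current byte) by two staged passes: first map all pixels to one parity bit-string, then decode it purely positionally by slicing at stride 9 (8-bit byte then separator), with no per-bit state.
import Mathlib
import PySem

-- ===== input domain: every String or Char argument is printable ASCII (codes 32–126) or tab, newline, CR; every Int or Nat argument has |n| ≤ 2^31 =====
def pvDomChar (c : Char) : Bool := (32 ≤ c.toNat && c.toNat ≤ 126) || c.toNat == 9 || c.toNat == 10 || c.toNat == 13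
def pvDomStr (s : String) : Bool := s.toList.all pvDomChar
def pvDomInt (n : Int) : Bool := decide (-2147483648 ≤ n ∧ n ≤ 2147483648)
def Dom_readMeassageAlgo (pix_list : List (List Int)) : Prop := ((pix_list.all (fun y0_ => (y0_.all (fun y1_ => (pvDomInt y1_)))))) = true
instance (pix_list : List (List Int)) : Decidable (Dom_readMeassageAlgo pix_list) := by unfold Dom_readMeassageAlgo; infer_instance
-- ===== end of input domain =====

-- B replaces A's stateful per-pixel counter machine by two staged passes (build the whole parity bit-string, then decode it by stride-9 positional slicing); a different decomposition, not claimed faster.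

-- ===== PORT A =====
-- isEven(v): int(v) % 2 == 0  (Python % has the divisor's sign; PySem.Int.mod is exact)
def pvIsEven (v : Int) : Bool := PySem.Int.mod v 2 == 0

-- inner while over one row; Sum.inr = the early `return asciiBinary`
def pvAInner : List Int → Int → Nat → List String → ((Int × Nat × List String) ⊕ List String)
  | [], cptB, cptC, asc => Sum.inl (cptB, cptC, asc)
  | v :: js, cptB, cptC, asc =>
    if 8 ≤ cptB then
      if pvIsEven v then pvAInner js 0 (cptC + 1) (asc ++ [""])
      else Sum.inr asc
    else
      pvAInner js (cptB + 1) cptC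
        (asc.modify cptC (fun s => if !(pvIsEven v) then s ++ "1" else s ++ "0"))

-- outer while over the rows
def pvAOuter : List (List Int) → Int → Nat → List String → List String
  | [], _, _, asc => asc
  | row :: rows, cptB, cptC, asc =>
    match pvAInner row cptB cptC asc with
    | Sum.inl (b, c, a) => pvAOuter rows b c a
    | Sum.inr a => a

def readMeassageAlgo (pix_list : List (List Int)) : List String :=
  pvAOuter pix_list 0 0 [""]

-- ===== PORT B =====
-- "1" if int(v) % 2 else "0" (one character of the bit-string)
def pvBitChar (v : Int) : Char := if PySem.Int.mod v 2 ≠ 0 then '1' else '0'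

-- Stage-2 loop: the Python loop advances an index k by 9 over the fixed string `bits`;
-- ported as recursion on the suffix bits.drop k (so bits[k:k+8] = take 8, bits[k+8:k+9] = (drop 8).take 1).
def pvChunks (bits : List Char) : List String :=
  if (bits.drop 8).take 1 = ['0'] then
    String.ofList (bits.take 8) :: pvChunks (bits.drop 9)
  else
    [String.ofList (bits.take 8)]
termination_by bits.length
decreasing_by
  rename_i h
  have h8 : 8 < bits.length := by
    by_contra hle
    simp [List.drop_eq_nil_of_le (by omega : bits.length ≤ 8)] at h
  simp [List.length_drop]; omega

def readMeassageAlgo_alt (pix_list : List (List Int)) : List String :=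
  pvChunks (pix_list.flatMap (fun row => row.map pvBitChar))

-- ===== PRECONDITION & SPEC =====
def Spec_readMeassageAlgo (pix_list : List (List Int)) (out : List String) : Prop := out = readMeassageAlgo_alt pix_list
instance (pix_list : List (List Int)) (out : List String) : Decidable (Spec_readMeassageAlgo pix_list out) := by unfold Spec_readMeassageAlgo; infer_instance

-- ===== CLAIM (what is proved, stated in full; the proofs are below) =====
def Claim_equal_readMeassageAlgo : Prop := ∀ (pix_list : List (List Int)), Dom_readMeassageAlgo pix_list → Spec_readMeassageAlgo pix_list (readMeassageAlgo pix_list)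

-- ===== LEMMAS AND PROOFS =====

-- A's flat form: the value pvAInner yields on a single stream, whether or not it returned early
def pvAFlat (s : List Int) (b : Int) (c : Nat) (asc : List String) : List String :=
  match pvAInner s b c asc with
  | Sum.inl (_, _, a) => a
  | Sum.inr a => a

theorem pvAInner_append (xs ys : List Int) (b : Int) (c : Nat) (asc : List String) :
    pvAInner (xs ++ ys) b c asc =
      match pvAInner xs b c asc with
      | Sum.inl (b', c', a') => pvAInner ys b' c' a'
      | Sum.inr a => Sum.inr a := by
  induction xs generalizing b c asc with
  | nil => simp [pvAInner]
  | cons v js ih =>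
    simp only [List.cons_append, pvAInner]
    split
    · split
      · exact ih _ _ _
      · rfl
    · exact ih _ _ _

theorem pvAOuter_eq_flat (rows : List (List Int)) (b : Int) (c : Nat) (asc : List String) :
    pvAOuter rows b c asc = pvAFlat rows.flatten b c asc := by
  induction rows generalizing b c asc with
  | nil => simp [pvAOuter, pvAFlat, pvAInner]
  | cons row rest ih =>
    simp only [pvAOuter, List.flatten_cons, pvAFlat, pvAInner_append]
    cases h : pvAInner row b c asc with
    | inl t => obtain ⟨b', c', a'⟩ := t; simpa [pvAFlat] using ih b' c' a'
    | inr a => rfl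

theorem modify_concat : ∀ (ys : List String) (x : String) (f : String → String),
    (ys ++ [x]).modify ys.length f = ys ++ [f x]
  | [], _, _ => rfl
  | y :: ys, x, f => congrArg (y :: ·) (modify_concat ys x f)

theorem bit_str_eq (x : List Char) (v : Int) :
    (if !(pvIsEven v) then String.ofList x ++ "1" else String.ofList x ++ "0") =
      String.ofList (x ++ [pvBitChar v]) := by
  rw [String.ofList_append]
  by_cases h : PySem.Int.mod v 2 = 0
  · have h1 : pvIsEven v = true := by unfold pvIsEven; rw [h]; decide
    have h2 : pvBitChar v = '0' := by unfold pvBitChar; rw [if_neg (fun hc => hc h)]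
    rw [h1, h2]; rfl
  · have h1 : pvIsEven v = false := by unfold pvIsEven; simp only [beq_eq_false_iff_ne, ne_eq]; exact h
    have h2 : pvBitChar v = '1' := by unfold pvBitChar; rw [if_pos h]
    rw [h1, h2]; rfl

-- main bridge: under the state invariant (partial byte x of length b ≤ 8 is the last entry)
-- A's flat loop computes B's stride-9 chunking of the remaining bit-string
theorem flat_eq_chunks : ∀ (s : List Int) (ys : List String) (x : List Char) (b : Int),
    (x.length : Int) = b → b ≤ 8 →
    pvAFlat s b ys.length (ys ++ [String.ofList x]) = ys ++ pvChunks (x ++ s.map pvBitChar) := by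
  intro s
  induction s with
  | nil =>
    intro ys x b hb hle
    have hx : x.length ≤ 8 := by omega
    rw [pvChunks]
    simp [pvAFlat, pvAInner, List.drop_eq_nil_of_le hx, List.take_of_length_le hx]
  | cons v rest ih =>
    intro ys x b hb hle
    by_cases h8 : 8 ≤ b
    · -- full byte: v is the separator bit
      have hx8 : x.length = 8 := by omega
      have htake : ((x ++ pvBitChar v :: rest.map pvBitChar).take 8) = x := List.take_left' hx8
      have hdropC : ((x ++ pvBitChar v :: rest.map pvBitChar).drop 8) = pvBitChar v :: rest.map pvBitChar :=
        List.drop_left' hx8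
      have hdrop9 : ((x ++ pvBitChar v :: rest.map pvBitChar).drop 9) = rest.map pvBitChar := by
        have h99 : ((x ++ pvBitChar v :: rest.map pvBitChar).drop 9) =
            (((x ++ pvBitChar v :: rest.map pvBitChar).drop 8).drop 1) := by
          rw [List.drop_drop]
        rw [h99, hdropC, List.drop_one, List.tail_cons]
      rw [List.map_cons, pvChunks, htake, hdropC, hdrop9]
      by_cases hev : pvIsEven v
      · -- even separator: start a new byte / continue with the next chunk
        have hbc : pvBitChar v = '0' := by
          simp [pvIsEven] at hev; simp [pvBitChar, hev]
        have hstep : pvAFlat (v :: rest) b ys.length (ys ++ [String.ofList x]) =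
            pvAFlat rest 0 (ys.length + 1) ((ys ++ [String.ofList x]) ++ [""]) := by
          simp [pvAFlat, pvAInner, h8, hev]
        rw [hstep, hbc]
        simp only [List.take_succ_cons, List.take_zero]
        have hih := ih (ys ++ [String.ofList x]) [] 0 (by simp) (by norm_num)
        simp only [List.length_append, List.length_cons, List.length_nil, List.nil_append] at hih
        have hnil : (String.ofList ([] : List Char)) = "" := rfl
        rw [hnil] at hih
        rw [hih, List.append_assoc]
        rfl
      · -- odd separator: return
        have hbc : pvBitChar v = '1' := by
          simp [pvIsEven] at hev; simp [pvBitChar, hev]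
        rw [hbc]
        simp [pvAFlat, pvAInner, h8, hev]
    · -- byte not full: v is a data bit appended to the current byte
      have hstep : pvAFlat (v :: rest) b ys.length (ys ++ [String.ofList x]) =
          pvAFlat rest (b + 1) ys.length (ys ++ [String.ofList (x ++ [pvBitChar v])]) := by
        simp only [pvAFlat, pvAInner, if_neg h8, modify_concat, bit_str_eq]
      rw [hstep]
      have := ih ys (x ++ [pvBitChar v]) (b + 1) (by simp; omega) (by omega)
      simpa [List.append_assoc] using this

-- ===== VERDICT (by name: the statement is the Claim_ definition above) =====
theorem readMeassageAlgo_spec : Claim_equal_readMeassageAlgo := by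
  intro pix_list _
  unfold Spec_readMeassageAlgo readMeassageAlgo readMeassageAlgo_alt
  rw [pvAOuter_eq_flat]
  have hmap : pix_list.flatMap (fun row => row.map pvBitChar) = pix_list.flatten.map pvBitChar := by
    simp [List.flatMap_def, List.map_flatten]
  have := flat_eq_chunks pix_list.flatten [] [] 0 (by simp) (by norm_num)
  have hnil : (String.ofList ([] : List Char)) = "" := rfl
  rw [hnil] at this
  simpa [hmap] using this
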